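-- pv_equiv track=rewrite | github.com/dh7hong/algorithms-level-facebook | 158_hr.py | solution
-- ===== SOURCE A (Python) =====
-- def solution(scores):
--     wanho_att, wanho_peer = scores[0]
--     wanho_sum = wanho_att + wanho_peer
--
--     # 1. Sort by attitude DESC, peer ASC
--     scores.sort(key=lambda x: (-x[0], x[1]))
--
--     max_peer = 0
--     valid_sums = []
--
--     for att, peer in scores:
--         # If dominated
--         if peer < max_peer:
--             # Check if Wanh is dominated
--             if att == wanho_att and peer == wanho_peer:
--                 return -1
--             continue
--
--         # Valid employee
--         max_peer = max(max_peer, peer)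
--         valid_sums.append(att + peer)
--
--     # 2. Rank calculation
--     valid_sums.sort(reverse=True)
--
--     rank = 1
--     for total in valid_sums:
--         if total > wanho_sum:
--             rank += 1
--         elif total == wanho_sum:
--             return rank
--
--     return rank
-- ===== SOURCE B (Python) =====
-- def solution(scores):
--     wanho_att, wanho_peer = scores[0]
--     wanho_sum = wanho_att + wanho_peer
--
--     # same in-place sort as A (observable mutation of the argument)
--     scores.sort(key=lambda x: (-x[0], x[1]))
--
--     # Single fused pass: no valid_sums list, no second sort, no second scan.
--     # Rank = 1 + number of non-dominated employees whose total beats Wanho's.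
--     max_peer = 0
--     rank = 1
--     for att, peer in scores:
--         if peer < max_peer:
--             if att == wanho_att and peer == wanho_peer:
--                 return -1
--         else:
--             max_peer = peer
--             if att + peer > wanho_sum:
--                 rank += 1
--     return rank
-- ===== Notes on version B (the rewrite author's own statement) =====
-- stated objective: simpler
-- what changed: B fuses rank counting into the single domination-filter pass, maintaining an integer counter instead of building a valid_sums list, sorting it a second time and scanning it with an early return.
import Mathlib
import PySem

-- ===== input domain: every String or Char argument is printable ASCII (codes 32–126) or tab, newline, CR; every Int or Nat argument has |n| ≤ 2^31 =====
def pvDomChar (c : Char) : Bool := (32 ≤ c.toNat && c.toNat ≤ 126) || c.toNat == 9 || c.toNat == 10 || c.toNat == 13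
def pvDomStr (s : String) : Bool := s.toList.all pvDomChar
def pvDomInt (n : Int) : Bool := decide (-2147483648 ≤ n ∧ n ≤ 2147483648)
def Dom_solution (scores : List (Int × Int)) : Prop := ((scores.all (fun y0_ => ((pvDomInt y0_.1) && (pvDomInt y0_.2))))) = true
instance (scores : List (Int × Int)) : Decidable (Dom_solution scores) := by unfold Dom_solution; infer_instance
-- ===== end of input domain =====

-- B fuses rank counting into A's single filter pass (one counter, no valid_sums list,
-- no second sort/scan); both sort the argument in place, equivalence is about the return value.

-- ===== PORT A =====
-- first loop of A: none = the early 'return -1', some sums = the valid_sums list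
def solutionLoop1 (wa wp : Int) : Int → List (Int × Int) → Option (List Int)
  | _, [] => some []
  | mx, (a, p) :: rest =>
    if p < mx then
      if a = wa ∧ p = wp then none
      else solutionLoop1 wa wp mx rest
    else (solutionLoop1 wa wp (max mx p) rest).map ((a + p) :: ·)

-- second loop of A over the reverse-sorted valid_sums, with early 'return rank'
def solutionLoop2 (ws : Int) : Int → List Int → Int
  | rank, [] => rank
  | rank, t :: rest =>
    if t > ws then solutionLoop2 ws (rank + 1) rest
    else if t = ws then rank
    else solutionLoop2 ws rank rest

def solution (scores : List (Int × Int)) : Int :=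
  match scores with
  | [] => 0  -- unreachable: Pre_solution excludes []; Python raises IndexError on scores[0]
  | (wa, wp) :: _ =>
    let ws := wa + wp
    let s := PySem.List.sorted2 scores (fun x => -x.1) (fun x => x.2) false
    match solutionLoop1 wa wp 0 s with
    | none => -1
    | some sums => solutionLoop2 ws 1 (PySem.List.sorted sums (fun t => t) true)

-- ===== PORT B =====
-- B's single fused pass: counter 'rank' instead of a list; -1 is the early return
def solutionAltLoop (wa wp ws : Int) : Int → Int → List (Int × Int) → Int
  | _, rank, [] => rank
  | mx, rank, (a, p) :: rest =>
    if p < mx then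
      if a = wa ∧ p = wp then -1
      else solutionAltLoop wa wp ws mx rank rest
    else solutionAltLoop wa wp ws p (if a + p > ws then rank + 1 else rank) rest

def solution_alt (scores : List (Int × Int)) : Int :=
  match scores with
  | [] => 0  -- unreachable under Pre_solution, as in the port of A
  | (wa, wp) :: _ =>
    let ws := wa + wp
    let s := PySem.List.sorted2 scores (fun x => -x.1) (fun x => x.2) false
    solutionAltLoop wa wp ws 0 1 s

-- ===== PRECONDITION & SPEC =====
-- Pre_ excludes only the empty list, on which Python A raises IndexError at scores[0]
def Pre_solution (scores : List (Int × Int)) : Prop := scores ≠ []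
instance (scores : List (Int × Int)) : Decidable (Pre_solution scores) := by unfold Pre_solution; infer_instance

def pvWitness_solution : (List (Int × Int)) := [(3, 4), (5, 1), (2, 2)]

def Spec_solution (scores : List (Int × Int)) (out : Int) : Prop := out = solution_alt scores
instance (scores : List (Int × Int)) (out : Int) : Decidable (Spec_solution scores out) := by unfold Spec_solution; infer_instance

-- ===== CLAIM (what is proved, stated in full; the proofs are below) =====
def Claim_equal_solution : Prop := ∀ (scores : List (Int × Int)), Dom_solution scores → Pre_solution scores → Spec_solution scores (solution scores)

-- ===== LEMMAS AND PROOFS =====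

-- A's second loop on a descending list returns 1 + (count of elements > ws)
theorem loop2_of_pairwise (ws : Int) : ∀ (l : List Int) (rank : Int),
    l.Pairwise (fun a b => b ≤ a) →
    solutionLoop2 ws rank l = rank + (l.countP (fun t => decide (ws < t)) : Int) := by
  intro l
  induction l with
  | nil => intro rank _; simp [solutionLoop2]
  | cons t rest ih =>
    intro rank hp
    rw [List.pairwise_cons] at hp
    obtain ⟨hall, hrest⟩ := hp
    by_cases h1 : ws < t
    · simp only [solutionLoop2, ih _ hrest, List.countP_cons, h1]
      simp; ring
    · have hz : rest.countP (fun t => decide (ws < t)) = 0 := by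
        rw [List.countP_eq_zero]
        intro x hx
        simp only [decide_eq_true_eq]
        exact fun hlt => h1 (lt_of_lt_of_le hlt (hall x hx))
      by_cases h2 : t = ws
      · simp [solutionLoop2, h2, hz]
      · simp [solutionLoop2, h1, h2, ih _ hrest, hz]

-- B's fused loop equals -1 / rank + count(> ws) according to A's first loop
theorem altLoop_eq (wa wp ws : Int) : ∀ (l : List (Int × Int)) (mx rank : Int),
    solutionAltLoop wa wp ws mx rank l =
      match solutionLoop1 wa wp mx l with
      | none => -1
      | some sums => rank + (sums.countP (fun t => decide (ws < t)) : Int) := by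
  intro l
  induction l with
  | nil => intro mx rank; simp [solutionAltLoop, solutionLoop1]
  | cons x rest ih =>
    intro mx rank
    obtain ⟨a, p⟩ := x
    by_cases h1 : p < mx
    · by_cases h2 : a = wa ∧ p = wp
      · simp only [solutionAltLoop, solutionLoop1, if_pos h1, if_pos h2]
      · simp only [solutionAltLoop, solutionLoop1, if_pos h1, if_neg h2]
        exact ih mx rank
    · have hmx : max mx p = p := by omega
      simp only [solutionAltLoop, solutionLoop1, if_neg h1, hmx, ih]
      cases solutionLoop1 wa wp p rest with
      | none => simp
      | some sums =>
        simp only [Option.map_some, List.countP_cons, decide_eq_true_eq]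
        by_cases h3 : ws < a + p
        · simp [h3]; ring
        · simp [h3]

-- ===== VERDICT (by name: the statement is the Claim_ definition above) =====
theorem solution_spec : Claim_equal_solution := by
  intro scores _ hpre
  unfold Spec_solution solution solution_alt
  match scores with
  | [] => exact absurd rfl hpre
  | (wa, wp) :: tl =>
    simp only
    rw [altLoop_eq]
    cases hL : solutionLoop1 wa wp 0
        (PySem.List.sorted2 ((wa, wp) :: tl) (fun x => -x.1) (fun x => x.2) false) with
    | none => rfl
    | some sums =>
      dsimp only
      rw [loop2_of_pairwise _ _ _ (by
            simpa using PySem.List.sorted_pairwise_rev sums (fun t => t)),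
          (PySem.List.sorted_perm sums (fun t => t) true).countP_eq _]
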